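-- pv_equiv track=rewrite | github.com/lionlion37/Advent-Of-Code | 2020/day10_adapter_array.py | part1
-- ===== SOURCE A (Python) =====
-- def part1(entries):
--     """
--     Counts the number of differences of 3 and number of differences of 1 in a sorted list.
--     :param entries: list of integers
--     :return: one_jolt: number of differences of 1, three_jolt: number of differences of 3
--     """
--     entries = sorted(entries)
--     one_jolt = 0
--     three_jolt = 1
--     if entries[0] == 1:
--         one_jolt += 1
--     elif entries[0] == 3:
--         three_jolt += 1
--
--     for n, el in enumerate(entries):
--
--         if n == len(entries) - 1:
--             break
--
--         if entries[n + 1] - el == 1: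
--             one_jolt += 1
--
--         elif entries[n + 1] - el == 3:
--             three_jolt += 1
--
--         else:
--             continue
--
--     return one_jolt, three_jolt
-- ===== SOURCE B (Python) =====
-- def part1(entries):
--     jolts = set(entries)
--     one = sum(1 for v in jolts if v + 1 in jolts)
--     three = 1 + sum(1 for v in jolts
--                     if v + 3 in jolts and v + 1 not in jolts and v + 2 not in jolts)
--     start = min(entries)
--     if start == 1:
--         one += 1
--     elif start == 3:
--         three += 1
--     return one, three
-- ===== Notes on version B (the rewrite author's own statement) =====
-- stated objective: alternative
-- what changed: B does not sort at all: it builds the value set once and counts each gap directly by membership (a 1-gap is a value v with v+1 present; a 3-gap is v with v+3 present and v+1, v+2 absent), adding the device's baseline 3-gap and checking the minimum entry against the charging-outlet wall, where A sorts and scans adjacent pairs with a counter loop.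
-- outside the precondition, e.g. on part1([]): A raises IndexError, B raises ValueError
import Mathlib
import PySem

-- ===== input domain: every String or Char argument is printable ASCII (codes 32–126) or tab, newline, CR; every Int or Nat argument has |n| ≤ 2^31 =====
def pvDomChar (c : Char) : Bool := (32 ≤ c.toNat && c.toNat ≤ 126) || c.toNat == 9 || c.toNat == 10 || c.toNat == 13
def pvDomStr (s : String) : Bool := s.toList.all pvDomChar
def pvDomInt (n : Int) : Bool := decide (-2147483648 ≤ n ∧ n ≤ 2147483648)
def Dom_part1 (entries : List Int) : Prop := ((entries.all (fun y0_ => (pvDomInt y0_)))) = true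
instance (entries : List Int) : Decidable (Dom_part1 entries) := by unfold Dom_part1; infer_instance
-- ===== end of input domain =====

-- B replaces A's sort-and-scan with set-membership counting: each gap of 1 resp. 3 between
-- consecutive sorted values is detected directly on the value set, with no sorting ('alternative').

-- ===== PORT A =====
-- the for-loop over enumerate(entries) with `break` at the last index and the es[n+1]-el tests,
-- as the obvious structural recursion over the same adjacent pairs and the same (one_jolt, three_jolt) state
def part1LoopA : List Int → Int × Int → Int × Int
  | a :: b :: rest, s =>
      part1LoopA (b :: rest)
        (if b - a = 1 then (s.1 + 1, s.2)
         else if b - a = 3 then (s.1, s.2 + 1)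
         else s)
  | _, s => s

def part1 (entries : List Int) : Int × Int :=
  let es := PySem.List.sorted entries (fun x => x) false
  match PySem.List.pyGet? es 0 with   -- the first-element access; none = IndexError, excluded by Pre_
  | none => (0, 0)
  | some e0 =>
    let one_jolt : Int := if e0 = 1 then 0 + 1 else 0
    let three_jolt : Int := if e0 = 1 then 1 else if e0 = 3 then 1 + 1 else 1
    part1LoopA es (one_jolt, three_jolt)

-- ===== PORT B =====
def part1_alt (entries : List Int) : Int × Int :=
  let jolts : PySem.Set Int := PySem.Set.ofList entries
  -- sum(1 for v in jolts if …): a 0/1-sum over the set's elements is List.countP (order-independent)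
  let one : Int := (List.countP (fun v => PySem.Set.contains jolts (v + 1)) jolts : Nat)
  let three : Int := 1 + (List.countP (fun v =>
      PySem.Set.contains jolts (v + 3) && !PySem.Set.contains jolts (v + 1)
        && !PySem.Set.contains jolts (v + 2)) jolts : Nat)
  match PySem.List.min? entries (fun x => x) with   -- min(entries); none = ValueError, excluded by Pre_
  | none => (0, 0)
  | some start =>
    if start = 1 then (one + 1, three)
    else if start = 3 then (one, three + 1)
    else (one, three)

-- ===== PRECONDITION & SPEC =====
-- A indexes the first element of the sorted list and raises IndexError on the empty list (B's min(entries) raises ValueError there), so Pre_ excludes exactly the empty input.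
def Pre_part1 (entries : List Int) : Prop := entries ≠ []
instance (entries : List Int) : Decidable (Pre_part1 entries) := by unfold Pre_part1; infer_instance
def pvWitness_part1 : List Int := ([1, 4, 5, 6, 9])

def Spec_part1 (entries : List Int) (out : Int × Int) : Prop := out = part1_alt entries
instance (entries : List Int) (out : Int × Int) : Decidable (Spec_part1 entries out) := by unfold Spec_part1; infer_instance

-- ===== CLAIM (what is proved, stated in full; the proofs are below) =====
def Claim_equal_part1 : Prop := ∀ (entries : List Int), Dom_part1 entries → Pre_part1 entries → Spec_part1 entries (part1 entries)

-- ===== LEMMAS AND PROOFS =====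

-- the adjacent-differences list of the sorted chain, for the lemmas about A's loop
def adjDiffs (l : List Int) : List Int := (l.zip (l.drop 1)).map (fun p => p.2 - p.1)

lemma adjDiffs_cons_cons (a b : Int) (rest : List Int) :
    adjDiffs (a :: b :: rest) = (b - a) :: adjDiffs (b :: rest) := by
  simp [adjDiffs]

lemma part1LoopA_eq_counts (l : List Int) (s : Int × Int) :
    part1LoopA l s =
      (s.1 + ((adjDiffs l).count 1 : Nat), s.2 + ((adjDiffs l).count 3 : Nat)) := by
  induction l generalizing s with
  | nil => simp [part1LoopA, adjDiffs]
  | cons a rest ih =>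
    cases rest with
    | nil => simp [part1LoopA, adjDiffs]
    | cons b rs =>
      rw [part1LoopA, ih, adjDiffs_cons_cons]
      by_cases h1 : b - a = 1
      · simp [h1]; omega
      · by_cases h3 : b - a = 3
        · simp [h3]; omega
        · simp [h1, h3]

-- a gap of d > 0 between consecutive elements of a sorted list = a value v such that v + d is
-- present and no value lies strictly between v and v + d
lemma countGap_adjDiffs (d : Int) (hd : 0 < d) (l : List Int) (hs : l.Pairwise (· ≤ ·)) :
    (adjDiffs l).count d =
      (l.toFinset.filter
        (fun v => v + d ∈ l.toFinset ∧ ∀ e ∈ l.toFinset, ¬(v < e ∧ e < v + d))).card := by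
  induction l with
  | nil => simp [adjDiffs]
  | cons a t ih =>
    obtain ⟨hta, ht⟩ := List.pairwise_cons.1 hs
    cases t with
    | nil =>
      have hempty : (([a] : List Int).toFinset.filter
          (fun v => v + d ∈ ([a] : List Int).toFinset ∧
            ∀ e ∈ ([a] : List Int).toFinset, ¬(v < e ∧ e < v + d))) = ∅ := by
        apply Finset.filter_eq_empty_iff.2
        intro v hv
        simp only [List.toFinset_cons, List.toFinset_nil, insert_empty_eq, Finset.mem_singleton] at hv
        subst hv
        rintro ⟨h1, -⟩
        simp only [List.toFinset_cons, List.toFinset_nil, insert_empty_eq, Finset.mem_singleton] at h1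
        omega
      rw [hempty]
      simp [adjDiffs]
    | cons b rs =>
      have hb_min : ∀ x ∈ b :: rs, b ≤ x := by
        obtain ⟨hbr, -⟩ := List.pairwise_cons.1 ht
        intro x hx
        rcases List.mem_cons.1 hx with h | h
        · exact h ▸ le_refl b
        · exact hbr x h
      rw [adjDiffs_cons_cons, List.count_cons, ih ht]
      by_cases hmem : a ∈ b :: rs
      · -- duplicate head: a = b, the new difference is 0, the value set is unchanged
        have hab : a = b := le_antisymm (hta b (by simp)) (hb_min a hmem)
        have hSet : (a :: b :: rs).toFinset = (b :: rs).toFinset := by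
          rw [List.toFinset_cons, Finset.insert_eq_self.2 (List.mem_toFinset.2 hmem)]
        have h0 : ¬ (b - a = d) := by omega
        rw [hSet]
        simp [beq_iff_eq, h0]
      · -- fresh head a, strictly below every element of the tail
        have hlt : ∀ x ∈ b :: rs, a < x :=
          fun x hx => lt_of_le_of_ne (hta x hx) (fun h => hmem (h ▸ hx))
        have haT : a ∉ (b :: rs).toFinset :=
          fun h => absurd (hlt a (List.mem_toFinset.1 h)) (lt_irrefl a)
        have hS : (a :: b :: rs).toFinset = insert a (b :: rs).toFinset :=
          List.toFinset_cons
        -- the predicate over the enlarged set agrees with the tail predicate on tail members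
        have hagree : ∀ v ∈ (b :: rs).toFinset,
            ((v + d ∈ insert a (b :: rs).toFinset ∧
                ∀ e ∈ insert a (b :: rs).toFinset, ¬(v < e ∧ e < v + d)) ↔
             (v + d ∈ (b :: rs).toFinset ∧
                ∀ e ∈ (b :: rs).toFinset, ¬(v < e ∧ e < v + d))) := by
          intro v hv
          have hav : a < v := hlt v (List.mem_toFinset.1 hv)
          constructor
          · rintro ⟨h1, h2⟩
            refine ⟨?_, fun e he => h2 e (Finset.mem_insert_of_mem he)⟩
            rcases Finset.mem_insert.1 h1 with h | h
            · omega
            · exact h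
          · rintro ⟨h1, h2⟩
            refine ⟨Finset.mem_insert_of_mem h1, ?_⟩
            intro e he
            rcases Finset.mem_insert.1 he with h | h
            · subst h; omega
            · exact h2 e h
        -- the predicate at a itself holds exactly when the first gap is d
        have hpa : (a + d ∈ insert a (b :: rs).toFinset ∧
              ∀ e ∈ insert a (b :: rs).toFinset, ¬(a < e ∧ e < a + d)) ↔ b - a = d := by
          have hbT : b ∈ (b :: rs).toFinset := by simp
          have hab : a < b := hlt b (by simp)
          constructor
          · rintro ⟨h1, h2⟩
            have h1T : a + d ∈ (b :: rs).toFinset := by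
              rcases Finset.mem_insert.1 h1 with h | h
              · omega
              · exact h
            have hble : b ≤ a + d := hb_min _ (List.mem_toFinset.1 h1T)
            have := h2 b (Finset.mem_insert_of_mem hbT)
            omega
          · intro h
            refine ⟨Finset.mem_insert_of_mem (by rw [show a + d = b by omega]; exact hbT), ?_⟩
            rintro e he ⟨he1, he2⟩
            rcases Finset.mem_insert.1 he with h' | h'
            · omega
            · have := hb_min e (List.mem_toFinset.1 h'); omega
        have hfe : (b :: rs).toFinset.filter
              (fun v => v + d ∈ insert a (b :: rs).toFinset ∧
                ∀ e ∈ insert a (b :: rs).toFinset, ¬(v < e ∧ e < v + d))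
            = (b :: rs).toFinset.filter
              (fun v => v + d ∈ (b :: rs).toFinset ∧
                ∀ e ∈ (b :: rs).toFinset, ¬(v < e ∧ e < v + d)) :=
          Finset.filter_congr (fun v hv => by simpa using hagree v hv)
        rw [hS, Finset.filter_insert, hfe]
        by_cases hbd : b - a = d
        · rw [if_pos (hpa.2 hbd),
            Finset.card_insert_of_notMem (fun h => haT (Finset.mem_of_mem_filter _ h))]
          simp [hbd]
        · rw [if_neg (fun h => hbd (hpa.1 h))]
          simp [hbd]

-- the gap-1 specialisation: the between-values condition is vacuous for d = 1
lemma count1_adjDiffs (l : List Int) (hs : l.Pairwise (· ≤ ·)) :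
    (adjDiffs l).count 1 = (l.toFinset.filter (fun v => v + 1 ∈ l.toFinset)).card := by
  rw [countGap_adjDiffs 1 one_pos l hs]
  refine congrArg Finset.card (Finset.filter_congr ?_)
  intro v hv
  constructor
  · exact fun h => h.1
  · exact fun h => ⟨h, fun e he hc => by omega⟩

-- the gap-3 specialisation: "no value strictly between v and v+3" = "v+1 and v+2 absent"
lemma count3_adjDiffs (l : List Int) (hs : l.Pairwise (· ≤ ·)) :
    (adjDiffs l).count 3 =
      (l.toFinset.filter
        (fun v => v + 3 ∈ l.toFinset ∧ v + 1 ∉ l.toFinset ∧ v + 2 ∉ l.toFinset)).card := by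
  rw [countGap_adjDiffs 3 (by omega) l hs]
  refine congrArg Finset.card (Finset.filter_congr ?_)
  intro v hv
  constructor
  · rintro ⟨h1, h2⟩
    exact ⟨h1, fun h => h2 _ h ⟨by omega, by omega⟩, fun h => h2 _ h ⟨by omega, by omega⟩⟩
  · rintro ⟨h1, h2, h3⟩
    refine ⟨h1, ?_⟩
    rintro e he ⟨he1, he2⟩
    rcases (by omega : e = v + 1 ∨ e = v + 2) with h | h
    · exact h2 (h ▸ he)
    · exact h3 (h ▸ he)

-- a Bool-predicate count over set(xs) is a filter-card over the Finset of values of xs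
lemma countP_ofList_eq_card (xs : List Int) (p : Int → Bool) (q : Int → Prop)
    [DecidablePred q] (hpq : ∀ v, p v = true ↔ q v) :
    (PySem.Set.ofList xs).countP p = (xs.toFinset.filter q).card := by
  rw [List.countP_eq_length_filter,
      ← List.toFinset_card_of_nodup ((PySem.Set.nodup_ofList xs).filter p),
      List.toFinset_filter]
  refine congrArg Finset.card ?_
  have hset : (PySem.Set.ofList xs).toFinset = xs.toFinset := by
    ext v
    simp [PySem.Set.mem_ofList]
  rw [hset]
  exact Finset.filter_congr (fun v hv => by rw [hpq v])

-- min(entries) is the head of sorted(entries)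
lemma min?_eq_head_sorted (entries : List Int) (e0 : Int) (t : List Int)
    (h : PySem.List.sorted entries (fun x => x) false = e0 :: t) :
    PySem.List.min? entries (fun x => x) = some e0 := by
  have hmem : e0 ∈ entries := by
    rw [← PySem.List.mem_sorted (xs := entries) (key := fun x => x) (rev := false), h]
    exact List.mem_cons_self
  cases hmin : PySem.List.min? entries (fun x => x) with
  | none =>
    rw [PySem.List.min?_eq_none_iff] at hmin
    simp [hmin, PySem.List.sorted] at h
  | some m =>
    have h1 : m ≤ e0 := PySem.List.min?_isMin hmin e0 hmem
    have h2 : e0 ≤ m :=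
      PySem.List.key_head_sorted_le entries (fun x => x) h m (PySem.List.min?_mem hmin)
    rw [le_antisymm h1 h2]

-- membership is unchanged by sorting
lemma toFinset_sorted (entries : List Int) :
    (PySem.List.sorted entries (fun x => x) false).toFinset = entries.toFinset := by
  ext v
  simp [PySem.List.mem_sorted]

-- ===== VERDICT (by name: the statement is the Claim_ definition above) =====
theorem part1_spec : Claim_equal_part1 := by
  intro entries _ hpre
  unfold Spec_part1 part1 part1_alt
  have hne : PySem.List.sorted entries (fun x => x) false ≠ [] := by
    rw [Ne, PySem.List.sorted_eq_nil_iff]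
    exact hpre
  obtain ⟨e0, t, hes⟩ := List.exists_cons_of_ne_nil hne
  have hsortp : (PySem.List.sorted entries (fun x => x) false).Pairwise (· ≤ ·) :=
    PySem.List.sorted_pairwise entries (fun x => x)
  rw [hes] at hsortp
  rw [hes, min?_eq_head_sorted entries e0 t hes]
  dsimp only
  rw [PySem.List.pyGet?_zero_cons]
  show part1LoopA (e0 :: t) _ = _
  rw [part1LoopA_eq_counts]
  have h1 : (adjDiffs (e0 :: t)).count 1 =
      (PySem.Set.ofList entries).countP
        (fun v => PySem.Set.contains (PySem.Set.ofList entries) (v + 1)) := by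
    rw [count1_adjDiffs _ hsortp,
        countP_ofList_eq_card entries _ (fun v => v + 1 ∈ entries.toFinset)
          (fun v => by simp [PySem.Set.contains, PySem.Set.mem_ofList])]
    rw [show (e0 :: t).toFinset = entries.toFinset from hes ▸ toFinset_sorted entries]
  have h3 : (adjDiffs (e0 :: t)).count 3 =
      (PySem.Set.ofList entries).countP
        (fun v => PySem.Set.contains (PySem.Set.ofList entries) (v + 3)
          && !PySem.Set.contains (PySem.Set.ofList entries) (v + 1)
          && !PySem.Set.contains (PySem.Set.ofList entries) (v + 2)) := by
    rw [count3_adjDiffs _ hsortp,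
        countP_ofList_eq_card entries _
          (fun v => v + 3 ∈ entries.toFinset ∧ v + 1 ∉ entries.toFinset ∧ v + 2 ∉ entries.toFinset)
          (fun v => by simp [PySem.Set.contains, PySem.Set.mem_ofList, and_assoc])]
    rw [show (e0 :: t).toFinset = entries.toFinset from hes ▸ toFinset_sorted entries]
  rw [h1, h3]
  split_ifs <;> simp only [Prod.mk.injEq] <;> constructor <;> first | omega | trivial
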